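-- pv_equiv track=rewrite | github.com/Volzhanin37/Artezio-Academy | Lesson II/04.py | range2
-- ===== SOURCE A (Python) =====
-- def range2(start=0, stop=None, step=1):
--     if stop == None:
--         stop = start
--         start = 0
--     l = []
--     i = start
--     while ((start < stop and step > 0 and i < stop ) or
--     (start > stop and step < 0 and i > stop)):
--         l.append(i)
--         i += step
--     return l
-- ===== SOURCE B (Python) =====
-- def range2(start=0, stop=None, step=1):
--     if stop is None:
--         start, stop = 0, start
--     if (step > 0 and start < stop) or (step < 0 and start > stop):
--         n = -((start - stop) // step)
--     else:
--         n = 0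
--     return [start + k * step for k in range(n)]
-- ===== Notes on version B (the rewrite author's own statement) =====
-- stated objective: alternative
-- what changed: B replaces A's conditional while-loop with a closed-form trip count via floor division and builds the list by a comprehension over range(n).
import Mathlib
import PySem

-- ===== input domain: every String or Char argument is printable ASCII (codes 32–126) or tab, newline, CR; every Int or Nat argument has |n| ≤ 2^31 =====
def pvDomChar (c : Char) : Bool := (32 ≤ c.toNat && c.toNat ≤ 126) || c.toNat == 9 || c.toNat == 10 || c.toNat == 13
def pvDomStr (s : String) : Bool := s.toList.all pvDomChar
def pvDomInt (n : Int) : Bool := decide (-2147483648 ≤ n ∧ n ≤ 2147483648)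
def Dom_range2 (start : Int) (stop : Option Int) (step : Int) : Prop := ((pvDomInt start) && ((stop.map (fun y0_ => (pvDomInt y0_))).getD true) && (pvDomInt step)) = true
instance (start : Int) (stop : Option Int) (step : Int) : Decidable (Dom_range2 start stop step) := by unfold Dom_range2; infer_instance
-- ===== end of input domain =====

-- B replaces A's while-loop with a closed-form trip count (floor division) and a map over range(n).

-- ===== PORT A =====
-- A's while loop: i starts at start, appends i and adds step while the (fixed-bounds) condition holds.
def range2Loop (start stop step i : Int) : List Int :=
  if h : (start < stop ∧ step > 0 ∧ i < stop) ∨ (start > stop ∧ step < 0 ∧ i > stop) then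
    i :: range2Loop start stop step (i + step)
  else []
termination_by (if step > 0 then stop - i else i - stop).toNat
decreasing_by
  rcases h with ⟨_, h2, h3⟩ | ⟨_, h2, h3⟩ <;> split_ifs <;> omega

def range2 (start : Int) (stop : Option Int) (step : Int) : List Int :=
  match stop with
  | none => range2Loop 0 start step 0
  | some s => range2Loop start s step start

-- ===== PORT B =====
def range2AltCount (start stop step : Int) : Nat :=
  if (step > 0 ∧ start < stop) ∨ (step < 0 ∧ start > stop) then
    (-(PySem.Int.floordiv (start - stop) step)).toNat
  else 0

def range2AltBuild (start stop step : Int) : List Int :=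
  (List.range (range2AltCount start stop step)).map (fun k : Nat => start + (k : Int) * step)

def range2_alt (start : Int) (stop : Option Int) (step : Int) : List Int :=
  match stop with
  | none => range2AltBuild 0 start step
  | some s => range2AltBuild start s step

-- ===== PRECONDITION & SPEC =====
def Spec_range2 (start : Int) (stop : Option Int) (step : Int) (out : List Int) : Prop := out = range2_alt start stop step
instance (start : Int) (stop : Option Int) (step : Int) (out : List Int) : Decidable (Spec_range2 start stop step out) := by unfold Spec_range2; infer_instance

-- ===== CLAIM (what is proved, stated in full; the proofs are below) =====
def Claim_equal_range2 : Prop := ∀ (start : Int) (stop : Option Int) (step : Int), Dom_range2 start stop step → Spec_range2 start stop step (range2 start stop step)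

-- ===== LEMMAS AND PROOFS =====

-- number of elements the loop will still produce from position i
def cnt (stop step i : Int) : Nat := (-(PySem.Int.floordiv (i - stop) step)).toNat

theorem floordiv_neg_iff_lt (a b : Int) (hb : 0 < b) :
    PySem.Int.floordiv a b < 0 ↔ a < 0 := by
  rw [PySem.Int.floordiv_lt_iff_lt_mul hb]; omega

-- ceiling recurrence: -floor(a/b) counts down by one when b is added to a < 0
theorem ceil_zero (a b : Int) (hb : 0 < b) (ha : 0 ≤ a) :
    (-(PySem.Int.floordiv a b)).toNat = 0 := by
  have := (floordiv_neg_iff_lt a b hb)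
  omega

theorem ceil_succ (a b : Int) (hb : 0 < b) (ha : a < 0) :
    (-(PySem.Int.floordiv a b)).toNat = (-(PySem.Int.floordiv (a + b) b)).toNat + 1 := by
  set q := PySem.Int.floordiv a b with hq
  have h1 : q * b ≤ a ∧ a < (q + 1) * b :=
    (PySem.Int.floordiv_eq_iff_of_pos hb).mp hq.symm
  have hqneg : q < 0 := by
    rcases h1 with ⟨h1, _⟩
    nlinarith
  have h2 : PySem.Int.floordiv (a + b) b = q + 1 := by
    rw [PySem.Int.floordiv_eq_iff_of_pos hb]
    constructor <;> nlinarith [h1.1, h1.2]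
  rw [h2]
  omega

theorem cnt_neg_flip (stop step i : Int) :
    cnt stop step i = (-(PySem.Int.floordiv (stop - i) (-step))).toNat := by
  unfold cnt
  rw [show stop - i = -(i - stop) by ring, PySem.Int.floordiv_neg_neg]

theorem map_shift (n : Nat) (i step : Int) :
    (List.range (n + 1)).map (fun k : Nat => i + (k : Int) * step) =
      i :: (List.range n).map (fun k : Nat => (i + step) + (k : Int) * step) := by
  rw [List.range_succ_eq_map, List.map_cons, List.map_map]
  refine congrArg₂ List.cons (by push_cast; ring) ?_
  apply List.map_congr_left
  intro k _
  simp only [Function.comp_apply]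
  push_cast
  ring

-- the loop from position i produces cnt elements i, i+step, …, in either direction
theorem loop_cnt (start stop step : Int)
    (hs : (0 < step ∧ start < stop) ∨ (step < 0 ∧ stop < start)) :
    ∀ (n : Nat) (i : Int), cnt stop step i = n →
      range2Loop start stop step i = (List.range n).map (fun k : Nat => i + (k : Int) * step) := by
  intro n
  induction n with
  | zero =>
    intro i hc
    rw [range2Loop]
    rcases hs with ⟨h1, h2⟩ | ⟨h1, h2⟩
    · have hni : ¬ i < stop := by
        by_contra h
        rw [show cnt stop step i = (-(PySem.Int.floordiv (i - stop) step)).toNat from rfl,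
          ceil_succ (i - stop) step h1 (by omega)] at hc
        omega
      rw [dif_neg (by omega)]; simp
    · have hni : ¬ stop < i := by
        by_contra h
        rw [cnt_neg_flip, ceil_succ (stop - i) (-step) (by omega) (by omega)] at hc
        omega
      rw [dif_neg (by omega)]; simp
  | succ n ih =>
    intro i hc
    rcases hs with ⟨h1, h2⟩ | ⟨h1, h2⟩
    · have hi : i < stop := by
        by_contra h
        rw [show cnt stop step i = (-(PySem.Int.floordiv (i - stop) step)).toNat from rfl,
          ceil_zero (i - stop) step h1 (by omega)] at hc
        omega
      rw [range2Loop, dif_pos (Or.inl ⟨h2, h1, hi⟩)]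
      have hrec : cnt stop step (i + step) = n := by
        rw [show cnt stop step i = (-(PySem.Int.floordiv (i - stop) step)).toNat from rfl,
          ceil_succ (i - stop) step h1 (by omega)] at hc
        unfold cnt
        rw [show i + step - stop = (i - stop) + step by ring]
        omega
      rw [ih (i + step) hrec, map_shift]
    · have hi : stop < i := by
        by_contra h
        rw [cnt_neg_flip, ceil_zero (stop - i) (-step) (by omega) (by omega)] at hc
        omega
      rw [range2Loop, dif_pos (Or.inr ⟨h2, h1, hi⟩)]
      have hrec : cnt stop step (i + step) = n := by
        rw [cnt_neg_flip, ceil_succ (stop - i) (-step) (by omega) (by omega)] at hc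
        rw [cnt_neg_flip]
        rw [show stop - (i + step) = (stop - i) + -step by ring]
        omega
      rw [ih (i + step) hrec, map_shift]

theorem build_eq (start stop step : Int) :
    range2Loop start stop step start = range2AltBuild start stop step := by
  unfold range2AltBuild range2AltCount
  split_ifs with h
  · rcases h with ⟨h1, h2⟩ | ⟨h1, h2⟩
    · exact loop_cnt start stop step (Or.inl ⟨h1, h2⟩) _ start rfl
    · exact loop_cnt start stop step (Or.inr ⟨h1, h2⟩) _ start rfl
  · rw [range2Loop, dif_neg (by omega)]
    simp

-- ===== VERDICT (by name: the statement is the Claim_ definition above) =====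
theorem range2_spec : Claim_equal_range2 := by
  intro start stop step _
  unfold Spec_range2 range2 range2_alt
  cases stop <;> simp [build_eq]
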